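-- pv_equiv track=rewrite | github.com/AmandaGouveia/grimoire | numerology.py | analyzeName
-- ===== SOURCE A (Python) =====
-- masterNumbers = True
--
-- def addDigits(inNum):
-- 	sum = 0
-- 	for digit in str(inNum):
-- 		sum += int(digit)
-- 	if sum < 10 or (masterNumbers and sum in [11, 22]):
-- 		return sum
-- 	else:
-- 		return addDigits(sum)
--
-- def letterValue(letter):
-- 	return (ord(letter) - 65) % 9 + 1
--
-- def analyzeName(name):
-- 	name = name.upper()
-- 	consonantsSum = 0
-- 	vowelsSum = 0
-- 	for letter in name:
-- 		if ord(letter) >=65 and ord(letter) <= 90: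
-- 			if letter in "AEIOUY":
-- 				vowelsSum += letterValue(letter)
-- 			else:
-- 				consonantsSum += letterValue(letter)
-- 	destiny = addDigits(vowelsSum + consonantsSum)
-- 	soul = addDigits(vowelsSum)
-- 	personality = addDigits(consonantsSum)
-- 	return (destiny, soul, personality)
-- ===== SOURCE B (Python) =====
-- masterNumbers = True
--
-- def analyzeName(name):
--     up = name.upper()
--     vals = [(c, (ord(c) - 65) % 9 + 1) for c in up if 'A' <= c <= 'Z']
--     vowels = sum(v for c, v in vals if c in "AEIOUY")
--     total = sum(v for _, v in vals)
--     consonants = total - vowels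
--
--     def reduce(n):
--         s = sum(int(d) for d in str(n))
--         while s >= 10 and not (masterNumbers and s in (11, 22)):
--             s = sum(int(d) for d in str(s))
--         return s
--
--     return (reduce(total), reduce(vowels), reduce(consonants))
-- ===== Notes on version B (the rewrite author's own statement) =====
-- stated objective: alternative
-- what changed: B builds one filtered (letter,value) list, computes the total and vowel sums by comprehension and gets the consonant sum by subtraction instead of A's two-accumulator branching loop, and replaces the recursive addDigits with an explicit iterative reduction loop.
import Mathlib
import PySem

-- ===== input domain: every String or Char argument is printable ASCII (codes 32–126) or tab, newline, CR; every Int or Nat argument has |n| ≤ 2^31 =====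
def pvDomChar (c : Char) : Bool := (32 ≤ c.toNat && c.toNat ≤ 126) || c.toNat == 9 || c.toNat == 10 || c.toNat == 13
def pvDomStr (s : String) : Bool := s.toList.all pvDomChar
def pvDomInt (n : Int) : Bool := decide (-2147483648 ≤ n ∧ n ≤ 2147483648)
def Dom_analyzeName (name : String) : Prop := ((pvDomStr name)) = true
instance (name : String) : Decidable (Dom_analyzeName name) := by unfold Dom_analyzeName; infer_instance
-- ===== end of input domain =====

-- B replaces A's two-accumulator branching loop by a filtered (letter,value) list with the
-- consonant sum obtained by subtraction, and A's recursive addDigits by an iterative loop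
-- (objective: alternative decomposition, same cost).

-- ===== PORT A =====

-- sum of int(d) for d in str(n); (c.toNat - 48) is exactly int(d) for the digit characters
-- produced here (analyzeName only ever passes nonnegative values, so no '-' occurs)
def digitSum (n : Int) : Int :=
  (PySem.Int.toChars n).foldl (fun acc c => acc + ((c.toNat : Int) - 48)) 0

-- addDigits, with a fuel guard making the same recursion total (never exhausted on the
-- nonnegative inputs analyzeName passes); fuel 0 returns the current level's digit sum
def addDigitsGo : Nat → Int → Int
  | 0, n => digitSum n
  | f + 1, n =>
    let s := digitSum n
    if s < 10 ∨ s = 11 ∨ s = 22 then s else addDigitsGo f s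

def addDigits (n : Int) : Int := addDigitsGo (n.toNat + 1) n

def letterValue (letter : Char) : Int := PySem.Int.mod ((letter.toNat : Int) - 65) 9 + 1

def analyzeName (name : String) : Int × Int × Int :=
  let up := PySem.Str.upper name
  -- state: (consonantsSum, vowelsSum), in declaration order; ord letter = letter.toNat
  let cv := up.toList.foldl
    (fun (p : Int × Int) letter =>
      if 65 ≤ letter.toNat ∧ letter.toNat ≤ 90 then
        if ("AEIOUY".toList.contains letter) then (p.1, p.2 + letterValue letter)
        else (p.1 + letterValue letter, p.2)
      else p) (0, 0)
  let destiny := addDigits (cv.2 + cv.1)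
  let soul := addDigits cv.2
  let personality := addDigits cv.1
  (destiny, soul, personality)

-- ===== PORT B =====

-- the while loop of Source B's reduce, with a fuel guard making it total (never exhausted here)
def reduceLoop : Nat → Int → Int
  | 0, s => s
  | f + 1, s =>
    if 10 ≤ s ∧ ¬(s = 11 ∨ s = 22) then reduceLoop f (digitSum s) else s

def reduceB (n : Int) : Int := reduceLoop (n.toNat + 1) (digitSum n)

def analyzeName_alt (name : String) : Int × Int × Int :=
  let up := PySem.Str.upper name
  let vals := (up.toList.filter (fun c => 'A' ≤ c ∧ c ≤ 'Z')).map
    (fun c => (c, PySem.Int.mod ((c.toNat : Int) - 65) 9 + 1))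
  let vowels := (vals.filter (fun p => "AEIOUY".toList.contains p.1)).foldl
    (fun a p => a + p.2) 0
  let total := vals.foldl (fun a p => a + p.2) 0
  let consonants := total - vowels
  (reduceB total, reduceB vowels, reduceB consonants)

-- ===== PRECONDITION & SPEC =====
def Spec_analyzeName (name : String) (out : Int × Int × Int) : Prop := out = analyzeName_alt name
instance (name : String) (out : Int × Int × Int) : Decidable (Spec_analyzeName name out) := by unfold Spec_analyzeName; infer_instance

-- ===== CLAIM (what is proved, stated in full; the proofs are below) =====
def Claim_equal_analyzeName : Prop := ∀ (name : String), Dom_analyzeName name → Spec_analyzeName name (analyzeName name)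

-- ===== LEMMAS AND PROOFS =====

-- addDigits (recursion) = reduceB (check-then-iterate loop), fuel levels aligned
theorem addDigitsGo_eq_reduceLoop (f : Nat) (n : Int) :
    addDigitsGo f n = reduceLoop f (digitSum n) := by
  induction f generalizing n with
  | zero => rfl
  | succ f ih =>
    simp only [addDigitsGo, reduceLoop]
    by_cases h : digitSum n < 10 ∨ digitSum n = 11 ∨ digitSum n = 22
    · rw [if_pos h, if_neg (by omega)]
    · rw [if_neg h, if_pos (by omega), ih]

theorem addDigits_eq_reduceB (n : Int) : addDigits n = reduceB n :=
  addDigitsGo_eq_reduceLoop _ n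

-- spec-side letter sums
def vowSum : List Char → Int
  | [] => 0
  | c :: t =>
    (if 65 ≤ c.toNat ∧ c.toNat ≤ 90 then
       if ("AEIOUY".toList.contains c) then letterValue c else 0
     else 0) + vowSum t

def consSum : List Char → Int
  | [] => 0
  | c :: t =>
    (if 65 ≤ c.toNat ∧ c.toNat ≤ 90 then
       if ("AEIOUY".toList.contains c) then 0 else letterValue c
     else 0) + consSum t

theorem foldA_eq (l : List Char) (cp vp : Int) :
    l.foldl
      (fun (p : Int × Int) letter =>
        if 65 ≤ letter.toNat ∧ letter.toNat ≤ 90 then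
          if ("AEIOUY".toList.contains letter) then (p.1, p.2 + letterValue letter)
          else (p.1 + letterValue letter, p.2)
        else p) (cp, vp) = (cp + consSum l, vp + vowSum l) := by
  induction l generalizing cp vp with
  | nil => simp [consSum, vowSum]
  | cons c t ih =>
    simp only [List.foldl_cons, consSum, vowSum]
    by_cases h : 65 ≤ c.toNat ∧ c.toNat ≤ 90
    · by_cases hv : ("AEIOUY".toList.contains c : Bool) = true
      · rw [if_pos h, if_pos h, if_pos h, if_pos hv, if_pos hv, if_pos hv, ih]
        simp only [Prod.mk.injEq]; constructor <;> ring
      · rw [if_pos h, if_pos h, if_pos h, if_neg hv, if_neg hv, if_neg hv, ih]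
        simp only [Prod.mk.injEq]; constructor <;> ring
    · rw [if_neg h, if_neg h, if_neg h, ih]
      simp only [Prod.mk.injEq]; constructor <;> ring

theorem charRange (c : Char) :
    ('A' ≤ c ∧ c ≤ 'Z') ↔ (65 ≤ c.toNat ∧ c.toNat ≤ 90) := by
  simp only [Char.le_def, UInt32.le_iff_toNat_le]
  exact and_congr Iff.rfl Iff.rfl

theorem foldB_total (l : List Char) (a : Int) :
    (((l.filter (fun c => 'A' ≤ c ∧ c ≤ 'Z')).map
        (fun c => (c, PySem.Int.mod ((c.toNat : Int) - 65) 9 + 1))).foldl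
      (fun a p => a + p.2) a) = a + vowSum l + consSum l := by
  induction l generalizing a with
  | nil => simp [vowSum, consSum]
  | cons c t ih =>
    simp only [List.filter_cons, vowSum, consSum]
    by_cases h : 'A' ≤ c ∧ c ≤ 'Z'
    · have h' := (charRange c).mp h
      rw [if_pos (decide_eq_true h), if_pos h', if_pos h']
      simp only [List.map_cons, List.foldl_cons]
      rw [ih]
      by_cases hv : ("AEIOUY".toList.contains c : Bool) = true
      · rw [if_pos hv, if_pos hv]; simp only [letterValue]; ring
      · rw [if_neg hv, if_neg hv]; simp only [letterValue]; ring
    · have h' : ¬(65 ≤ c.toNat ∧ c.toNat ≤ 90) := fun hh => h ((charRange c).mpr hh)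
      rw [if_neg (by simpa using h), if_neg h', if_neg h', ih]; ring

theorem foldB_vow (l : List Char) (a : Int) :
    ((((l.filter (fun c => 'A' ≤ c ∧ c ≤ 'Z')).map
        (fun c => (c, PySem.Int.mod ((c.toNat : Int) - 65) 9 + 1))).filter
        (fun p => "AEIOUY".toList.contains p.1)).foldl
      (fun a p => a + p.2) a) = a + vowSum l := by
  induction l generalizing a with
  | nil => simp [vowSum]
  | cons c t ih =>
    simp only [List.filter_cons, vowSum]
    by_cases h : 'A' ≤ c ∧ c ≤ 'Z'
    · have h' := (charRange c).mp h
      rw [if_pos (decide_eq_true h), if_pos h']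
      simp only [List.map_cons, List.filter_cons]
      by_cases hv : ("AEIOUY".toList.contains c : Bool) = true
      · rw [if_pos hv, if_pos hv]
        simp only [List.foldl_cons]
        rw [ih]
        simp only [letterValue]; ring
      · rw [if_neg hv, if_neg hv, ih]; ring
    · have h' : ¬(65 ≤ c.toNat ∧ c.toNat ≤ 90) := fun hh => h ((charRange c).mpr hh)
      rw [if_neg (by simpa using h), if_neg h', ih]; ring

-- ===== VERDICT (by name: the statement is the Claim_ definition above) =====
theorem analyzeName_spec : Claim_equal_analyzeName := by
  intro name _
  unfold Spec_analyzeName analyzeName analyzeName_alt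
  simp only [foldA_eq, foldB_total, foldB_vow, zero_add, addDigits_eq_reduceB]
  rw [show ∀ x y : Int, x + y - x = y from fun x y => by ring]
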